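-- pv_equiv track=rewrite | github.com/yool-seoul/programmers_resolved | 42626.py | solution
-- ===== SOURCE A (Python) =====
-- import heapq
--
-- def solution(SV, K):
--     cnt = 0
--     heapq.heapify(SV)
--
--     while True:
--         a = heapq.heappop(SV)
--         if a < K:
--             if len(SV) == 0:
--                 return -1
--             else:
--                 b = heapq.heappop(SV)
--                 heapq.heappush(SV, a + b * 2)
--                 cnt += 1
--         else:
--             return cnt
-- ===== SOURCE B (Python) =====
-- def solution(SV, K):
--     # Merge two ordered streams instead of a heap: the sorted originals and a FIFO
--     # of created mixtures (which come out usable in non-decreasing order); each pop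
--     # compares the two fronts.  NOTE: unlike A, B does not mutate the caller's SV
--     # (the equivalence is about the return value only).
--     xs = sorted(SV)
--     ms = []          # created mixtures, read at index j, appended at the back
--     i = j = 0
--     cnt = 0
--
--     def pop():
--         nonlocal i, j
--         if i < len(xs) and (j >= len(ms) or xs[i] <= ms[j]):
--             v = xs[i]
--             i += 1
--         else:
--             v = ms[j]
--             j += 1
--         return v
--
--     while True:
--         a = pop()
--         if a >= K:
--             return cnt
--         if (len(xs) - i) + (len(ms) - j) == 0:
--             return -1
--         b = pop()
--         ms.append(a + 2 * b)
--         cnt += 1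
-- ===== Notes on version B (the rewrite author's own statement) =====
-- stated objective: faster
-- what changed: Replaces the binary heap by a merge of two ordered streams: sort SV once and keep created mixtures in a FIFO queue (they arise in usable non-decreasing order), popping the smaller of the two fronts; A mutates SV in place, B does not (return-value equivalence).
import Mathlib
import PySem

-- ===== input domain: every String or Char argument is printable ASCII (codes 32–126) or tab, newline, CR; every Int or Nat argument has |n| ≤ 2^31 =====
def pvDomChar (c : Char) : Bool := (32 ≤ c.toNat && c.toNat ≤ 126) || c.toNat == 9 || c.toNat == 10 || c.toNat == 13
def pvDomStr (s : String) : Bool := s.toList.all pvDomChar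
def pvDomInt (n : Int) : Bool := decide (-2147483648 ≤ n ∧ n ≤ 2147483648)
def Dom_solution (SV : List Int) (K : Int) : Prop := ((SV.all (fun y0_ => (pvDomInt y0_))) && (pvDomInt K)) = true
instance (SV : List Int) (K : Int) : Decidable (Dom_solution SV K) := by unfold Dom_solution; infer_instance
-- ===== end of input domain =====

-- B replaces A's binary heap by a merge of two ordered streams (sorted originals + a FIFO of
-- created mixtures); return-value equivalence only (A mutates the caller's SV in place via
-- heapify/heappop/heappush, B does not mutate SV).

-- ===== PORT A =====
-- CPython heapq transliterated on List Int.  All list writes `heap[i] = x` are in range, so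
-- `List.set` is exact; reads use `List.getD _ _ 0` which equals Python's `heap[i]` in range.

-- heapq._siftdown's while-loop (newitem = the value being sifted toward startpos).
-- Each loop below recurses on an explicit fuel that only makes the recursion structural;
-- the chosen fuel is always sufficient, so the guard never fires on the computed path.
def sdLoop (fuel : Nat) (heap : List Int) (startpos pos : Nat) (newitem : Int) : List Int :=
  match fuel with
  | 0 => heap.set pos newitem      -- unreachable: fuel ≥ pos and the loop stops at pos = startpos
  | f + 1 =>
    if startpos < pos then
      let parentpos := (pos - 1) / 2
      let parent := heap.getD parentpos 0
      if newitem < parent then sdLoop f (heap.set pos parent) startpos parentpos newitem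
      else heap.set pos newitem
    else heap.set pos newitem

-- heapq._siftdown(heap, startpos, pos)
def pySiftdown (heap : List Int) (startpos pos : Nat) : List Int :=
  sdLoop pos heap startpos pos (heap.getD pos 0)

-- heapq._siftup's while-loop; ends with heap[pos] = newitem; _siftdown(heap, startpos, pos)
def suLoop (fuel : Nat) (heap : List Int) (startpos pos : Nat) (newitem : Int) : List Int :=
  match fuel with
  | 0 => pySiftdown (heap.set pos newitem) startpos pos   -- unreachable: fuel + pos ≥ len
  | f + 1 =>
    if 2 * pos + 1 < heap.length then
      let childpos := if 2 * pos + 2 < heap.length ∧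
          ¬ (heap.getD (2 * pos + 1) 0 < heap.getD (2 * pos + 2) 0)
        then 2 * pos + 2 else 2 * pos + 1
      suLoop f (heap.set pos (heap.getD childpos 0)) startpos childpos newitem
    else pySiftdown (heap.set pos newitem) startpos pos

-- heapq._siftup(heap, pos)
def pySiftup (heap : List Int) (pos : Nat) : List Int :=
  suLoop heap.length heap pos pos (heap.getD pos 0)

-- heapq.heappop: lastelt = heap.pop(); if heap: return heap[0] after heap[0]=lastelt; _siftup(heap,0)
def pyHeappop (heap : List Int) : Int × List Int :=
  -- lastelt = heap.pop(); rest = the remaining list (inlined below)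
  if heap.dropLast.isEmpty then (heap.getLastD 0, heap.dropLast)
  else (heap.dropLast.getD 0 0, pySiftup (heap.dropLast.set 0 (heap.getLastD 0)) 0)

-- heapq.heappush: heap.append(item); _siftdown(heap, 0, len(heap)-1)
def pyHeappush (heap : List Int) (item : Int) : List Int :=
  pySiftdown (heap ++ [item]) 0 ((heap ++ [item]).length - 1)

-- heapq.heapify: for i in reversed(range(n//2)): _siftup(x, i)
def heapifyGo (x : List Int) : Nat → List Int
  | 0 => x
  | i + 1 => heapifyGo (pySiftup x i) i

def pyHeapify (x : List Int) : List Int := heapifyGo x (x.length / 2)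

-- the main `while True` loop of A; heap = [] is Python's IndexError case (excluded by Pre_);
-- fuel = the heap's size bounds the number of mixes (each mix shrinks the heap by one)
def solutionLoop (fuel : Nat) (heap : List Int) (K : Int) (cnt : Int) : Int :=
  match fuel with
  | 0 => 0    -- unreachable: fuel ≥ heap.length > number of remaining iterations
  | f + 1 =>
    if heap = [] then 0
    else
      if (pyHeappop heap).1 < K then
        if (pyHeappop heap).2.length = 0 then -1
        else
          solutionLoop f
            (pyHeappush (pyHeappop (pyHeappop heap).2).2
              ((pyHeappop heap).1 + (pyHeappop (pyHeappop heap).2).1 * 2)) K (cnt + 1)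
      else cnt

def solution (SV : List Int) (K : Int) : Int :=
  solutionLoop SV.length (pyHeapify SV) K 0

-- ===== PORT B =====
-- Source B: xs = sorted(SV); ms = the FIFO of created mixtures.  The port carries the live
-- suffixes xs[i:] and ms[j:] as lists (the pointers i, j only move forward, so ms.append
-- on the suffix is `++ [v]`).

-- Source B's pop(): take the smaller of the two fronts, preferring xs on ties;
-- both lists empty is Python's IndexError case (excluded by Pre_)
def bPop (xs ms : List Int) : Int × List Int × List Int :=
  match xs, ms with
  | x :: xs', m :: ms' => if x ≤ m then (x, xs', m :: ms') else (m, x :: xs', ms')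
  | x :: xs', [] => (x, xs', [])
  | [], m :: ms' => (m, [], ms')
  | [], [] => (0, [], [])    -- unreachable under Pre_ (Python IndexError)

-- Source B's `while True` loop; fuel = pool size bounds the number of iterations, as in port A
def mergeLoop (fuel : Nat) (xs ms : List Int) (K cnt : Int) : Int :=
  match fuel with
  | 0 => 0    -- unreachable: fuel ≥ pool size > number of remaining iterations
  | f + 1 =>
    if xs.length + ms.length = 0 then 0    -- unreachable under Pre_ (Python IndexError)
    else
      let p := bPop xs ms
      if p.1 ≥ K then cnt
      else if p.2.1.length + p.2.2.length = 0 then -1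
      else
        let p2 := bPop p.2.1 p.2.2
        mergeLoop f p2.2.1 (p2.2.2 ++ [p.1 + 2 * p2.1]) K (cnt + 1)

def solution_alt (SV : List Int) (K : Int) : Int :=
  mergeLoop SV.length (PySem.List.sorted SV (fun x => x) false) [] K 0

-- ===== PRECONDITION & SPEC =====
-- Pre_ excludes only SV = [], on which A raises IndexError (heappop of an empty list); B raises there too.
def Pre_solution (SV : List Int) (K : Int) : Prop := SV ≠ []
instance (SV : List Int) (K : Int) : Decidable (Pre_solution SV K) := by
  unfold Pre_solution; infer_instance

def pvWitness_solution : List Int × Int := ([1, 2, 3, 9, 10, 12], 7)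

def Spec_solution (SV : List Int) (K : Int) (out : Int) : Prop := out = solution_alt SV K
instance (SV : List Int) (K : Int) (out : Int) : Decidable (Spec_solution SV K out) := by
  unfold Spec_solution; infer_instance

-- ===== CLAIM (what is proved, stated in full; the proofs are below) =====
def Claim_equal_solution : Prop :=
  ∀ (SV : List Int) (K : Int), Dom_solution SV K → Pre_solution SV K →
    Spec_solution SV K (solution SV K)

-- ===== LEMMAS AND PROOFS =====

-- ―――― the reference process of the proof: one sorted list, pop two heads, ordered insert ――――

def insLoop (v : Int) : List Int → List Int
  | [] => [v]
  | x :: xs => if x < v then x :: insLoop v xs else v :: x :: xs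

def altLoop (fuel : Nat) (xs : List Int) (K : Int) (cnt : Int) : Int :=
  match fuel with
  | 0 => 0
  | f + 1 =>
    match xs with
    | [] => 0
    | a :: rest =>
      if a ≥ K then cnt
      else
        match rest with
        | [] => -1
        | b :: rest2 => altLoop f (insLoop (a + 2 * b) rest2) K (cnt + 1)

-- value at index i (0 when out of range; every real access is in range)
def pval (h : List Int) (i : Nat) : Int := h.getD i 0

-- parent index in the binary heap
def hpar (j : Nat) : Nat := (j - 1) / 2

-- `ancB s j` : node j lies in the subtree rooted at s
def ancB (s j : Nat) : Bool :=
  if j < s then false else if j = s then true else ancB s ((j - 1) / 2)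
termination_by j
decreasing_by omega

-- all heap edges whose parent lies in the subtree rooted at s
def EOn (h : List Int) (s : Nat) : Prop :=
  ∀ j, 0 < j → j < h.length → ancB s (hpar j) = true → pval h (hpar j) ≤ pval h j

def IsHeap (h : List Int) : Prop := EOn h 0

-- as EOn, except the edge into node `pos`
def EExc (h : List Int) (s pos : Nat) : Prop :=
  ∀ j, 0 < j → j < h.length → ancB s (hpar j) = true → j ≠ pos → pval h (hpar j) ≤ pval h j

-- as EOn, except every edge incident to node `pos`
def EExc2 (h : List Int) (s pos : Nat) : Prop :=
  ∀ j, 0 < j → j < h.length → ancB s (hpar j) = true → j ≠ pos → hpar j ≠ pos →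
    pval h (hpar j) ≤ pval h j

-- all heap edges whose parent index is ≥ m (heapify's downward invariant)
def EdgesGE (h : List Int) (m : Nat) : Prop :=
  ∀ j, 0 < j → j < h.length → m ≤ hpar j → pval h (hpar j) ≤ pval h j

theorem sdLoop_length (fuel : Nat) (heap : List Int) (s p : Nat) (v : Int) :
    (sdLoop fuel heap s p v).length = heap.length := by
  fun_induction sdLoop fuel heap s p v <;> simp_all [List.length_set]

theorem suLoop_length (fuel : Nat) (heap : List Int) (s p : Nat) (v : Int) :
    (suLoop fuel heap s p v).length = heap.length := by
  fun_induction suLoop fuel heap s p v <;>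
    simp_all [pySiftdown, sdLoop_length, List.length_set]

theorem pyHeappop_length (heap : List Int) (h : heap ≠ []) :
    (pyHeappop heap).2.length = heap.length - 1 := by
  unfold pyHeappop pySiftup
  split
  · rename_i hemp
    rw [List.isEmpty_iff] at hemp
    have h2 : heap.length - 1 = 0 := by
      have h3 := congrArg List.length hemp
      simpa using h3
    simp [hemp, h2]
  · simp [suLoop_length, List.length_set, List.length_dropLast]

theorem pyHeappush_length (heap : List Int) (item : Int) :
    (pyHeappush heap item).length = heap.length + 1 := by
  simp [pyHeappush, pySiftdown, sdLoop_length]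

theorem ancB_le {s j : Nat} (h : ancB s j = true) : s ≤ j := by
  fun_induction ancB s j with
  | case1 => simp_all
  | case2 => omega
  | case3 j h1 h2 ih =>
    have h2 := ih h
    omega

theorem ancB_self (s : Nat) : ancB s s = true := by
  rw [ancB]; simp

theorem ancB_zero (j : Nat) : ancB 0 j = true := by
  fun_induction ancB 0 j with
  | case1 => omega
  | case2 => rfl
  | case3 j h1 h2 ih => exact ih

theorem ancB_par {s j : Nat} (hj : s < j) : ancB s j = ancB s (hpar j) := by
  rw [ancB, hpar]; simp [Nat.not_lt.mpr hj.le, Nat.ne_of_gt hj]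

theorem hpar_children {x j : Nat} (hp : hpar j = x) (hj : 0 < j) :
    j = 2 * x + 1 ∨ j = 2 * x + 2 := by
  unfold hpar at hp; omega

theorem set_getD_self (l : List Int) (i : Nat) (hi : i < l.length) :
    l.set i (l.getD i 0) = l := by
  rw [List.getD_eq_getElem?_getD, List.getElem?_eq_getElem hi, Option.getD_some,
    List.set_getElem_self hi]

theorem pval_dropLast (l : List Int) (j : Nat) (hj : j < l.length - 1) :
    pval l.dropLast j = pval l j := by
  have hjl : j < l.length := by omega
  simp [pval, List.getD_eq_getElem?_getD, hj, List.getElem?_eq_getElem hjl]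

theorem pval_append_left (l t : List Int) (j : Nat) (hj : j < l.length) :
    pval (l ++ t) j = pval l j := by
  simp [pval, List.getD_eq_getElem?_getD, List.getElem?_append_left hj]

theorem pval_set_ne (h : List Int) {i j : Nat} (a : Int) (hij : i ≠ j) :
    pval (h.set i a) j = pval h j := by
  simp [pval, List.getD_eq_getElem?_getD, List.getElem?_set_ne hij]

theorem pval_set_self (h : List Int) {i : Nat} (a : Int) (hi : i < h.length) :
    pval (h.set i a) i = a := by
  simp [pval, List.getD_eq_getElem?_getD, List.getElem?_set_self hi]

-- a :: set k b ~ b :: set k a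
theorem cons_set_perm (tl : List Int) (k : Nat) (a b : Int) (hk : k < tl.length) :
    (a :: tl.set k b).Perm (b :: tl.set k a) := by
  induction tl generalizing k with
  | nil => simp at hk
  | cons y r ih =>
    cases k with
    | zero => simpa using List.Perm.swap b a r
    | succ m =>
      simp only [List.set_cons_succ]
      exact (List.Perm.swap _ _ _).trans
        (((ih m (by simpa using hk)).cons y).trans (List.Perm.swap _ _ _))

-- moving l[j] into position i and writing v at j is, as a multiset, writing v at i
theorem set_swap_perm (l : List Int) (i j : Nat) (v : Int)
    (hij : i ≠ j) (hi : i < l.length) (hj : j < l.length) :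
    ((l.set i (l.getD j 0)).set j v).Perm (l.set i v) := by
  induction l generalizing i j with
  | nil => simp at hi
  | cons x tl ih =>
    cases j with
    | zero =>
      obtain ⟨k, rfl⟩ : ∃ k, i = k + 1 := ⟨i - 1, by omega⟩
      simpa using cons_set_perm tl k v x (by simpa using hi)
    | succ m =>
      cases i with
      | zero =>
        have hm : m < tl.length := by simpa using hj
        have h2 := cons_set_perm tl m (tl.getD m 0) v hm
        rw [List.getD_eq_getElem?_getD, List.getElem?_eq_getElem hm, Option.getD_some,
          List.set_getElem_self hm] at h2
        simpa [List.getD_eq_getElem?_getD, List.getElem?_eq_getElem hm] using h2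
      | succ k =>
        simpa using (ih k m (by omega) (by simpa using hi) (by simpa using hj)).cons x

-- ―――― sdLoop ――――

theorem sdLoop_perm (fuel : Nat) (h : List Int) (s pos : Nat) (v : Int)
    (hp : pos < h.length) :
    (sdLoop fuel h s pos v).Perm (h.set pos v) := by
  fun_induction sdLoop fuel h s pos v with
  | case1 => exact List.Perm.refl _
  | case2 a b fl c d e g ih =>
    exact (ih (by simp only [List.length_set]; omega)).trans
      (set_swap_perm a b d v (by omega) hp (by omega))
  | case3 => exact List.Perm.refl _
  | case4 => exact List.Perm.refl _

theorem sdLoop_unchanged (fuel : Nat) (h : List Int) (s pos : Nat) (v : Int)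
    (hanc : ancB s pos = true) :
    ∀ j, ancB s j = false → pval (sdLoop fuel h s pos v) j = pval h j := by
  fun_induction sdLoop fuel h s pos v with
  | case1 a b =>
    intro j hj
    exact pval_set_ne a v (by rintro rfl; rw [hanc] at hj; cases hj)
  | case2 a b fl c d e g ih =>
    intro j hj
    have hd : ancB s d = true := by
      have h2 := ancB_par (s := s) (j := b) c
      unfold hpar at h2
      show ancB s ((b - 1) / 2) = true
      rw [← h2]; exact hanc
    rw [ih hd j hj]
    exact pval_set_ne a e (by rintro rfl; rw [hanc] at hj; cases hj)
  | case3 a b fl c d e g =>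
    intro j hj
    exact pval_set_ne a v (by rintro rfl; rw [hanc] at hj; cases hj)
  | case4 a b fl c =>
    intro j hj
    exact pval_set_ne a v (by rintro rfl; rw [hanc] at hj; cases hj)

theorem sdLoop_heap (fuel : Nat) (h : List Int) (s pos : Nat) (v : Int)
    (hp : pos < h.length) (hf : pos ≤ fuel) (hanc : ancB s pos = true)
    (he : EExc h s pos)
    (hv : v ≤ pval h pos)
    (hch : s < pos → ∀ c, 0 < c → c < h.length → hpar c = pos →
      pval h (hpar pos) ≤ pval h c) :
    EOn (sdLoop fuel h s pos v) s := by
  fun_induction sdLoop fuel h s pos v with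
  | case1 a b =>
    -- fuel = 0 forces pos = 0 (hf), hence s = 0 = pos
    have hbs : b = s := le_antisymm (by omega) (ancB_le hanc)
    intro j hj0 hjl hancp
    simp only [List.length_set] at hjl
    by_cases hjb : j = b
    · subst hjb
      exfalso
      have h2 : s ≤ hpar j := ancB_le hancp
      have h3 : hpar j < j := by unfold hpar; omega
      omega
    · by_cases hpj : hpar j = b
      · have h1 : pval (a.set b v) j = pval a j := pval_set_ne a v fun h2 => hjb h2.symm
        have h2 : pval (a.set b v) (hpar j) = v := by
          rw [hpj]; exact pval_set_self a v hp
        have h5 := he j hj0 hjl (by rw [hpj]; exact hanc) hjb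
        rw [hpj] at h5
        rw [h1, h2]
        exact le_trans hv h5
      · rw [pval_set_ne a v fun h2 => hjb h2.symm,
          pval_set_ne a v fun h2 => hpj h2.symm]
        exact he j hj0 hjl hancp hjb
  | case2 a b fl c d e f ih =>
    have hd2 : d = (b - 1) / 2 := rfl
    have hanc_d : ancB s d = true := by
      have h2 := ancB_par c
      unfold hpar at h2
      show ancB s ((b - 1) / 2) = true
      rw [← h2]; exact hanc
    refine ih (by simp only [List.length_set]; omega) (by omega) hanc_d ?_ ?_ ?_
    · intro j hj0 hjl hancp hjd
      simp only [List.length_set] at hjl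
      by_cases hjb : j = b
      · subst hjb
        have h1 : pval (a.set j e) d = e := by
          rw [pval_set_ne a e (by omega)]; rfl
        have h2 : pval (a.set j e) j = e := pval_set_self a e hp
        rw [show hpar j = d from rfl, h1, h2]
      · by_cases hpj : hpar j = b
        · have h1 : pval (a.set b e) j = pval a j := pval_set_ne a e fun h2 => hjb h2.symm
          have h2 : pval (a.set b e) (hpar j) = e := by
            rw [hpj]; exact pval_set_self a e hp
          rw [h1, h2]
          exact hch c j hj0 hjl hpj
        · rw [pval_set_ne a e fun h2 => hjb h2.symm,
            pval_set_ne a e fun h2 => hpj h2.symm]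
          exact he j hj0 hjl hancp hjb
    · have h1 : pval (a.set b e) d = e := by
        rw [pval_set_ne a e (by omega)]; rfl
      rw [h1]; exact f.le
    · intro hsd j hj0 hjl hpj
      simp only [List.length_set] at hjl
      have hanc_pd : ancB s (hpar d) = true := by
        have h3 := ancB_par hsd
        rw [← h3]; exact hanc_d
      have hpd_ne : hpar d ≠ b := by unfold hpar; omega
      have h2 : pval (a.set b e) (hpar d) = pval a (hpar d) := pval_set_ne a e hpd_ne.symm
      have hedge_d : pval a (hpar d) ≤ pval a d :=
        he d (by omega) (by omega) hanc_pd (by omega)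
      by_cases hjb : j = b
      · subst hjb
        have h3 : pval (a.set j e) j = e := pval_set_self a e hp
        rw [h2, h3]
        exact hedge_d
      · have h3 : pval (a.set b e) j = pval a j := pval_set_ne a e fun h4 => hjb h4.symm
        have hedge_j := he j hj0 hjl (by rw [hpj]; exact hanc_d) hjb
        rw [hpj] at hedge_j
        rw [h2, h3]
        exact le_trans hedge_d hedge_j
  | case3 a b fl c d e f =>
    intro j hj0 hjl hancp
    simp only [List.length_set] at hjl
    by_cases hjb : j = b
    · subst hjb
      have h1 : pval (a.set j v) j = v := pval_set_self a v hp
      have h2 : pval (a.set j v) (hpar j) = pval a (hpar j) :=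
        pval_set_ne a v (by unfold hpar; omega)
      rw [h1, h2]
      exact not_lt.mp f
    · by_cases hpj : hpar j = b
      · have h1 : pval (a.set b v) j = pval a j := pval_set_ne a v fun h2 => hjb h2.symm
        have h2 : pval (a.set b v) (hpar j) = v := by
          rw [hpj]; exact pval_set_self a v hp
        have h5 := he j hj0 hjl (by rw [hpj]; exact hanc) hjb
        rw [hpj] at h5
        rw [h1, h2]
        exact le_trans hv h5
      · rw [pval_set_ne a v fun h2 => hjb h2.symm,
          pval_set_ne a v fun h2 => hpj h2.symm]
        exact he j hj0 hjl hancp hjb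
  | case4 a b fl c =>
    have hbs : b = s := le_antisymm (Nat.le_of_not_lt c) (ancB_le hanc)
    intro j hj0 hjl hancp
    simp only [List.length_set] at hjl
    by_cases hjb : j = b
    · subst hjb
      exfalso
      have h2 : s ≤ hpar j := ancB_le hancp
      have h3 : hpar j < j := by unfold hpar; omega
      omega
    · by_cases hpj : hpar j = b
      · have h1 : pval (a.set b v) j = pval a j := pval_set_ne a v fun h2 => hjb h2.symm
        have h2 : pval (a.set b v) (hpar j) = v := by
          rw [hpj]; exact pval_set_self a v hp
        have h5 := he j hj0 hjl (by rw [hpj]; exact hanc) hjb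
        rw [hpj] at h5
        rw [h1, h2]
        exact le_trans hv h5
      · rw [pval_set_ne a v fun h2 => hjb h2.symm,
          pval_set_ne a v fun h2 => hpj h2.symm]
        exact he j hj0 hjl hancp hjb

-- ―――― suLoop ――――

theorem suLoop_perm (fuel : Nat) (h : List Int) (s pos : Nat) (v : Int)
    (hp : pos < h.length) :
    (suLoop fuel h s pos v).Perm (h.set pos v) := by
  fun_induction suLoop fuel h s pos v with
  | case1 a b =>
    rw [pySiftdown, show (a.set b v).getD b 0 = v from pval_set_self a v hp]
    have h2 := sdLoop_perm b (a.set b v) s b v (by simp only [List.length_set]; exact hp)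
    simpa [List.set_set] using h2
  | case2 a b fl c d e =>
    have hdef : d = if 2 * b + 2 < a.length ∧ ¬a.getD (2 * b + 1) 0 < a.getD (2 * b + 2) 0
        then 2 * b + 2 else 2 * b + 1 := rfl
    have hbd : b < d ∧ d < a.length := by
      rw [hdef]; split <;> rename_i hc
      · exact ⟨by omega, hc.1⟩
      · exact ⟨by omega, c⟩
    exact (e (by simp only [List.length_set]; omega)).trans
      (set_swap_perm a b d v (by omega) hp (by omega))
  | case3 a b fl c =>
    rw [pySiftdown, show (a.set b v).getD b 0 = v from pval_set_self a v hp]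
    have h2 := sdLoop_perm b (a.set b v) s b v (by simp only [List.length_set]; exact hp)
    simpa [List.set_set] using h2

theorem suLoop_unchanged (fuel : Nat) (h : List Int) (s pos : Nat) (v : Int)
    (hanc : ancB s pos = true) :
    ∀ j, ancB s j = false → pval (suLoop fuel h s pos v) j = pval h j := by
  fun_induction suLoop fuel h s pos v with
  | case1 a b =>
    intro j hj
    rw [pySiftdown, sdLoop_unchanged _ _ s b _ hanc j hj]
    exact pval_set_ne a v (by rintro rfl; rw [hanc] at hj; cases hj)
  | case2 a b fl c d e =>
    have hdef : d = if 2 * b + 2 < a.length ∧ ¬a.getD (2 * b + 1) 0 < a.getD (2 * b + 2) 0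
        then 2 * b + 2 else 2 * b + 1 := rfl
    have hpd : hpar d = b := by unfold hpar; rw [hdef]; split <;> omega
    have hanc_d : ancB s d = true := by
      have hsd : s < d := by
        have h2 := ancB_le hanc
        have h3 : b < d := by rw [hdef]; split <;> omega
        omega
      rw [ancB_par hsd, hpd]; exact hanc
    intro j hj
    rw [e hanc_d j hj]
    exact pval_set_ne a _ (by rintro rfl; rw [hanc] at hj; cases hj)
  | case3 a b fl c =>
    intro j hj
    rw [pySiftdown, sdLoop_unchanged _ _ s b _ hanc j hj]
    exact pval_set_ne a v (by rintro rfl; rw [hanc] at hj; cases hj)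

theorem suLoop_heap (fuel : Nat) (h : List Int) (s pos : Nat) (v : Int)
    (hp : pos < h.length) (hf : h.length ≤ fuel + pos) (hanc : ancB s pos = true)
    (he : EExc2 h s pos)
    (hch : s < pos → ∀ c, 0 < c → c < h.length → hpar c = pos →
      pval h (hpar pos) ≤ pval h c) :
    EOn (suLoop fuel h s pos v) s := by
  fun_induction suLoop fuel h s pos v with
  | case1 a b =>
    have c : ¬ 2 * b + 1 < a.length := by omega
    rw [pySiftdown, show (a.set b v).getD b 0 = v from pval_set_self a v hp]
    have hnc : ∀ j, 0 < j → j < a.length → hpar j ≠ b := by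
      intro j hj0 hjl hpj
      have := hpar_children hpj hj0
      omega
    refine sdLoop_heap b (a.set b v) s b v (by simpa using hp) (le_refl b) hanc ?_ ?_ ?_
    · intro j hj0 hjl hancp hjb
      simp only [List.length_set] at hjl
      rw [pval_set_ne a v (fun h4 => hjb h4.symm),
        pval_set_ne a v (fun h4 => (hnc j hj0 hjl) h4.symm)]
      exact he j hj0 hjl hancp hjb (hnc j hj0 hjl)
    · rw [pval_set_self a v hp]
    · intro hsb j hj0 hjl hpj
      simp only [List.length_set] at hjl
      cases hnc j hj0 hjl hpj
  | case2 a b fl c d e =>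
    have hdef : d = if 2 * b + 2 < a.length ∧ ¬a.getD (2 * b + 1) 0 < a.getD (2 * b + 2) 0
        then 2 * b + 2 else 2 * b + 1 := rfl
    have hbd : b < d ∧ d < a.length := by
      rw [hdef]; split <;> rename_i hc
      · exact ⟨by omega, hc.1⟩
      · exact ⟨by omega, c⟩
    have hpd : hpar d = b := by unfold hpar; rw [hdef]; split <;> omega
    have hanc_d : ancB s d = true := by
      have hsd : s < d := by
        have h2 := ancB_le hanc
        omega
      rw [ancB_par hsd, hpd]; exact hanc
    -- d is the smaller child of b
    have hmin : ∀ j, 0 < j → j < a.length → hpar j = b → j ≠ d →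
        a.getD d 0 ≤ a.getD j 0 := by
      intro j hj0 hjl hpj hjd
      rcases hpar_children hpj hj0 with rfl | rfl
      · rw [hdef] at hjd ⊢
        split at hjd
        · rename_i hc; rw [if_pos hc]; exact not_lt.mp hc.2
        · cases hjd rfl
      · rw [hdef] at hjd ⊢
        split at hjd
        · cases hjd rfl
        · rename_i hc
          rw [if_neg hc]
          rcases not_and_or.mp hc with h3 | h3
          · cases h3 hjl
          · exact (not_not.mp h3).le
    refine e (by simp only [List.length_set]; omega) (by
      simp only [List.length_set]
      have h9 : b < d ∧ d < a.length := hbd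
      omega) hanc_d ?_ ?_
    · -- EExc2 (a.set b (a.getD d 0)) s d
      intro j hj0 hjl hancp hjd hpjd
      simp only [List.length_set] at hjl
      by_cases hjb : j = b
      · subst hjb
        have h1 : pval (a.set j (a.getD d 0)) j = pval a d := pval_set_self a _ hp
        have hparj : hpar j ≠ j := by unfold hpar; omega
        have h2 : pval (a.set j (a.getD d 0)) (hpar j) = pval a (hpar j) :=
          pval_set_ne a _ (fun h4 => hparj h4.symm)
        rw [h1, h2]
        have hsb : s < j := by
          have h3 := ancB_le hancp
          have h4 : hpar j < j := by unfold hpar; omega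
          omega
        exact hch hsb d (by omega) (by omega) hpd
      · by_cases hpjb : hpar j = b
        · have h1 : pval (a.set b (a.getD d 0)) j = pval a j :=
            pval_set_ne a _ (fun h4 => hjb h4.symm)
          have h2 : pval (a.set b (a.getD d 0)) (hpar j) = pval a d := by
            rw [hpjb]; exact pval_set_self a _ hp
          rw [h1, h2]
          exact hmin j hj0 hjl hpjb hjd
        · rw [pval_set_ne a _ (fun h4 => hjb h4.symm),
            pval_set_ne a _ (fun h4 => hpjb h4.symm)]
          exact he j hj0 hjl hancp hjb hpjb
    · -- children of d in the new list
      intro hsd j hj0 hjl hpjd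
      simp only [List.length_set] at hjl
      have hjd : d < j := by
        have := hpar_children hpjd hj0
        omega
      have h1 : pval (a.set b (a.getD d 0)) j = pval a j :=
        pval_set_ne a _ (by omega)
      have h2 : pval (a.set b (a.getD d 0)) (hpar d) = pval a d := by
        rw [hpd]; exact pval_set_self a _ hp
      rw [h1, h2]
      have h5 := he j hj0 hjl (by rw [hpjd]; exact hanc_d) (by omega) (by omega)
      rw [hpjd] at h5
      exact h5
  | case3 a b fl c =>
    rw [pySiftdown, show (a.set b v).getD b 0 = v from pval_set_self a v hp]
    have hnc : ∀ j, 0 < j → j < a.length → hpar j ≠ b := by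
      intro j hj0 hjl hpj
      have := hpar_children hpj hj0
      omega
    refine sdLoop_heap b (a.set b v) s b v (by simpa using hp) (le_refl b) hanc ?_ ?_ ?_
    · intro j hj0 hjl hancp hjb
      simp only [List.length_set] at hjl
      rw [pval_set_ne a v (fun h4 => hjb h4.symm),
        pval_set_ne a v (fun h4 => (hnc j hj0 hjl) h4.symm)]
      exact he j hj0 hjl hancp hjb (hnc j hj0 hjl)
    · rw [pval_set_self a v hp]
    · intro hsb j hj0 hjl hpj
      simp only [List.length_set] at hjl
      cases hnc j hj0 hjl hpj

-- ―――― heap operations ――――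

theorem root_min (h : List Int) (hh : IsHeap h) :
    ∀ j, j < h.length → pval h 0 ≤ pval h j := by
  intro j
  induction j using Nat.strong_induction_on with
  | _ j ih =>
    intro hj
    rcases Nat.eq_zero_or_pos j with rfl | hpos
    · exact le_refl _
    · exact le_trans (ih (hpar j) (by unfold hpar; omega) (by unfold hpar at *; omega))
        (hh j hpos hj (ancB_zero _))

theorem pval_min (h : List Int) (hh : IsHeap h) : ∀ x ∈ h, pval h 0 ≤ x := by
  intro x hx
  obtain ⟨j, hj, rfl⟩ := List.mem_iff_getElem.mp hx
  have h2 := root_min h hh j hj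
  rw [show pval h j = h[j] from by
    rw [pval, List.getD_eq_getElem?_getD, List.getElem?_eq_getElem hj, Option.getD_some]] at h2
  exact h2

theorem pyHeappop_spec (h : List Int) (hne : h ≠ []) (hh : IsHeap h) :
    IsHeap (pyHeappop h).2 ∧ ((pyHeappop h).1 :: (pyHeappop h).2).Perm h ∧
      (∀ x ∈ h, (pyHeappop h).1 ≤ x) := by
  have hmin := pval_min h hh
  unfold pyHeappop
  by_cases hemp : h.dropLast.isEmpty
  · -- h has exactly one element
    rw [if_pos hemp]
    rw [List.isEmpty_iff] at hemp
    obtain ⟨x, rfl⟩ : ∃ x, h = [x] := by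
      rcases h with _ | ⟨x, t⟩
      · cases hne rfl
      · rcases t with _ | ⟨y, t⟩
        · exact ⟨x, rfl⟩
        · simp at hemp
    refine ⟨?_, ?_, ?_⟩
    · intro j hj0 hjl
      simp at hjl
    · simp
    · intro y hy
      simp at hy
      subst hy
      simp
  · rw [if_neg hemp]
    rw [List.isEmpty_iff] at hemp
    have hlen2 : 2 ≤ h.length := by
      rcases h with _ | ⟨x, _ | ⟨y, r⟩⟩
      · cases hne rfl
      · simp at hemp
      · simp
    have hdl : h.dropLast.length = h.length - 1 := List.length_dropLast
    have h0lt : 0 < h.dropLast.length := by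
      rw [hdl]; omega
    have hval0 : h.dropLast.getD 0 0 = pval h 0 := pval_dropLast h 0 (by omega)
    have hsu := suLoop_heap (h.dropLast.set 0 (h.getLastD 0)).length
      (h.dropLast.set 0 (h.getLastD 0)) 0 0
      ((h.dropLast.set 0 (h.getLastD 0)).getD 0 0)
      (by simpa using h0lt) (by omega) (ancB_self 0)
      (by
        intro j hj0 hjl hanc hjne hpjne
        simp only [List.length_set] at hjl
        rw [pval_set_ne _ _ (fun h4 => hjne h4.symm),
          pval_set_ne _ _ (fun h4 => hpjne h4.symm),
          pval_dropLast h j (by omega), pval_dropLast h (hpar j) (by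
            have : hpar j < j := by unfold hpar; omega
            omega)]
        exact hh j hj0 (by omega) (ancB_zero _))
      (fun hcon => absurd hcon (lt_irrefl 0))
    have hsp := suLoop_perm (h.dropLast.set 0 (h.getLastD 0)).length
      (h.dropLast.set 0 (h.getLastD 0)) 0 0
      ((h.dropLast.set 0 (h.getLastD 0)).getD 0 0) (by simpa using h0lt)
    rw [set_getD_self _ 0 (by simpa using h0lt)] at hsp
    refine ⟨hsu, ?_, ?_⟩
    · -- permutation
      refine (hsp.cons _).trans ?_
      obtain ⟨r0, rt, hrest⟩ : ∃ r0 rt, h.dropLast = r0 :: rt := by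
        rcases hdl2 : h.dropLast with _ | ⟨r0, rt⟩
        · cases hemp hdl2
        · exact ⟨r0, rt, rfl⟩
      rw [hrest]
      simp only [List.set_cons_zero, List.getD_cons_zero]
      have hstep : (r0 :: h.getLastD 0 :: rt).Perm ((r0 :: rt) ++ [h.getLastD 0]) := by
        exact ((List.perm_append_singleton (h.getLastD 0) rt).symm.cons r0)
      refine hstep.trans ?_
      rw [← hrest]
      rw [List.getLastD_eq_getLast?, List.getLast?_eq_some_getLast hne]
      show (h.dropLast ++ [h.getLast hne]).Perm h
      rw [List.dropLast_concat_getLast hne]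
    · intro x hx
      obtain ⟨r0, rt, hrest⟩ : ∃ r0 rt, h.dropLast = r0 :: rt := by
        rcases hdl2 : h.dropLast with _ | ⟨r0, rt⟩
        · cases hemp hdl2
        · exact ⟨r0, rt, rfl⟩
      have : h.dropLast.getD 0 0 = pval h 0 := hval0
      rw [show (h.dropLast.getD 0 0) = pval h 0 from hval0]
      exact hmin x hx

theorem pyHeappush_spec (h : List Int) (x : Int) (hh : IsHeap h) :
    IsHeap (pyHeappush h x) ∧ (pyHeappush h x).Perm (x :: h) := by
  have hlen : (h ++ [x]).length = h.length + 1 := by simp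
  have hgd : (h ++ [x]).getD h.length 0 = x := by
    rw [List.getD_eq_getElem?_getD, List.getElem?_concat_length]
    rfl
  have hplt : h.length < (h ++ [x]).length := by simp
  unfold pyHeappush pySiftdown
  rw [hlen]
  simp only [Nat.add_sub_cancel]
  rw [hgd]
  constructor
  · refine sdLoop_heap h.length (h ++ [x]) 0 h.length x hplt (le_refl _) (ancB_zero _) ?_ ?_ ?_
    · intro j hj0 hjl hanc hjn
      have hjh : j < h.length := by
        rw [hlen] at hjl; omega
      have hpjh : hpar j < h.length := by
        have : hpar j < j := by unfold hpar; omega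
        omega
      rw [pval_append_left h [x] j hjh, pval_append_left h [x] (hpar j) hpjh]
      exact hh j hj0 hjh (ancB_zero _)
    · rw [show pval (h ++ [x]) h.length = x from hgd]
    · intro hpos j hj0 hjl hpj
      exfalso
      have := hpar_children hpj hj0
      rw [hlen] at hjl
      omega
  · have hperm := sdLoop_perm h.length (h ++ [x]) 0 h.length x hplt
    have hset := set_getD_self (h ++ [x]) h.length hplt
    rw [hgd] at hset
    rw [hset] at hperm
    exact hperm.trans (List.perm_append_singleton x h)

theorem heapifyGo_spec : ∀ (i : Nat) (x : List Int), i ≤ x.length / 2 → EdgesGE x i →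
    IsHeap (heapifyGo x i) ∧ (heapifyGo x i).Perm x := by
  intro i
  induction i with
  | zero =>
    intro x _ hE
    exact ⟨fun j hj0 hjl _ => hE j hj0 hjl (Nat.zero_le _), List.Perm.refl _⟩
  | succ i ih =>
    intro x hi hE
    have hil : i < x.length := by
      have := Nat.div_le_self x.length 2
      omega
    have hsu_len : (pySiftup x i).length = x.length := by
      unfold pySiftup; exact suLoop_length _ _ _ _ _
    have hEx2 : EExc2 x i i := by
      intro j hj0 hjl hanc hji hpji
      exact hE j hj0 hjl (by have := ancB_le hanc; omega)
    have hheap := suLoop_heap x.length x i i (x.getD i 0) hil (by omega) (ancB_self i) hEx2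
      (fun hcon => absurd hcon (lt_irrefl i))
    have hunch := suLoop_unchanged x.length x i i (x.getD i 0) (ancB_self i)
    have hE' : EdgesGE (pySiftup x i) i := by
      intro j hj0 hjl hij
      rw [hsu_len] at hjl
      by_cases hb : ancB i (hpar j) = true
      · exact hheap j hj0 (by rw [suLoop_length]; exact hjl) hb
      · have hbj : ancB i j = false := by
          cases hq : ancB i j
          · rfl
          · exfalso
            have hji : i ≤ j := ancB_le hq
            have hjne : j ≠ i := by
              intro h4
              subst h4
              have : hpar j = j ∨ hpar j < j := by unfold hpar; omega
              rcases this with h5 | h5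
              · rw [h5] at hb; rw [hq] at hb; exact hb rfl
              · unfold hpar at h5 hij; omega
            have := ancB_par (show i < j by omega)
            rw [hq] at this
            rw [← this] at hb
            exact hb rfl
        have hbp : ancB i (hpar j) = false := by
          cases hq : ancB i (hpar j)
          · rfl
          · rw [hq] at hb; cases hb rfl
        unfold pySiftup
        rw [suLoop_unchanged x.length x i i _ (ancB_self i) j hbj,
          suLoop_unchanged x.length x i i _ (ancB_self i) (hpar j) hbp]
        have hine : i ≠ hpar j := by
          intro h4
          rw [← h4, ancB_self] at hbp
          cases hbp
        exact hE j hj0 hjl (by omega)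
    have hperm : (pySiftup x i).Perm x := by
      unfold pySiftup
      have := suLoop_perm x.length x i i (x.getD i 0) hil
      rwa [set_getD_self x i hil] at this
    obtain ⟨h1, h2⟩ := ih (pySiftup x i) (by rw [hsu_len]; omega) hE'
    exact ⟨h1, h2.trans hperm⟩

theorem pyHeapify_spec (x : List Int) :
    IsHeap (pyHeapify x) ∧ (pyHeapify x).Perm x := by
  unfold pyHeapify
  refine heapifyGo_spec (x.length / 2) x (le_refl _) ?_
  intro j hj0 hjl hge
  exfalso
  unfold hpar at hge
  omega

-- ―――― the reference process (sorted list) ――――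

theorem insLoop_perm (v : Int) (xs : List Int) : (insLoop v xs).Perm (v :: xs) := by
  induction xs with
  | nil => simp [insLoop]
  | cons x xs ih =>
    simp only [insLoop]
    split
    · exact (ih.cons x).trans (List.Perm.swap v x xs)
    · exact List.Perm.refl _

theorem insLoop_pairwise (v : Int) (xs : List Int) (hs : xs.Pairwise (· ≤ ·)) :
    (insLoop v xs).Pairwise (· ≤ ·) := by
  induction xs with
  | nil => simp [insLoop]
  | cons x xs ih =>
    rw [List.pairwise_cons] at hs
    simp only [insLoop]
    split
    · rename_i hxv
      rw [List.pairwise_cons]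
      refine ⟨fun y hy => ?_, ih hs.2⟩
      rcases List.mem_cons.mp ((insLoop_perm v xs).mem_iff.mp hy) with rfl | h
      · exact hxv.le
      · exact hs.1 y h
    · rename_i hxv
      rw [List.pairwise_cons]
      exact ⟨fun y hy => by
        rcases List.mem_cons.mp hy with rfl | h
        · exact not_lt.mp hxv
        · exact le_trans (not_lt.mp hxv) (hs.1 y h),
        List.pairwise_cons.mpr hs⟩

theorem insLoop_length (v : Int) (xs : List Int) :
    (insLoop v xs).length = xs.length + 1 := by
  induction xs with
  | nil => rfl
  | cons x xs ih => simp only [insLoop]; split <;> simp [ih]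

-- ―――― the A-vs-reference bisimulation ――――

theorem solutionLoop_nil (fuel : Nat) (K cnt : Int) : solutionLoop fuel [] K cnt = 0 := by
  cases fuel <;> simp [solutionLoop]

theorem solutionLoop_ret (f : Nat) (h : List Int) (K cnt : Int) (hne : h ≠ [])
    (hK : ¬ (pyHeappop h).1 < K) : solutionLoop (f + 1) h K cnt = cnt := by
  simp only [solutionLoop]
  rw [if_neg hne, if_neg hK]

theorem solutionLoop_neg1 (f : Nat) (h : List Int) (K cnt : Int) (hne : h ≠ [])
    (hK : (pyHeappop h).1 < K) (hlen : (pyHeappop h).2.length = 0) :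
    solutionLoop (f + 1) h K cnt = -1 := by
  simp only [solutionLoop]
  rw [if_neg hne, if_pos hK, if_pos hlen]

theorem solutionLoop_step (f : Nat) (h : List Int) (K cnt : Int) (hne : h ≠ [])
    (hK : (pyHeappop h).1 < K) (hlen : ¬ (pyHeappop h).2.length = 0) :
    solutionLoop (f + 1) h K cnt =
      solutionLoop f (pyHeappush (pyHeappop (pyHeappop h).2).2
        ((pyHeappop h).1 + (pyHeappop (pyHeappop h).2).1 * 2)) K (cnt + 1) := by
  simp only [solutionLoop]
  rw [if_neg hne, if_pos hK, if_neg hlen]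

theorem altLoop_nil (fuel : Nat) (K cnt : Int) : altLoop fuel [] K cnt = 0 := by
  cases fuel <;> simp [altLoop]

theorem altLoop_ret (f : Nat) (a : Int) (rest : List Int) (K cnt : Int) (hK : a ≥ K) :
    altLoop (f + 1) (a :: rest) K cnt = cnt := by
  simp only [altLoop]
  rw [if_pos hK]

theorem altLoop_neg1 (f : Nat) (a : Int) (K cnt : Int) (hK : ¬ a ≥ K) :
    altLoop (f + 1) [a] K cnt = -1 := by
  simp only [altLoop]
  rw [if_neg hK]

theorem altLoop_step (f : Nat) (a b : Int) (rest2 : List Int) (K cnt : Int) (hK : ¬ a ≥ K) :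
    altLoop (f + 1) (a :: b :: rest2) K cnt = altLoop f (insLoop (a + 2 * b) rest2) K (cnt + 1) := by
  simp only [altLoop]
  rw [if_neg hK]

theorem loops_eq : ∀ (n : Nat) (h s : List Int) (K cnt : Int) (fa fb : Nat),
    h.length = n → n ≤ fa → n ≤ fb → IsHeap h → s.Pairwise (· ≤ ·) → h.Perm s →
    solutionLoop fa h K cnt = altLoop fb s K cnt := by
  intro n
  induction n with
  | zero =>
    intro h s K cnt fa fb hlen _ _ hh hs hperm
    obtain rfl : h = [] := List.length_eq_zero_iff.mp hlen
    obtain rfl : s = [] := List.length_eq_zero_iff.mp (hperm.length_eq ▸ hlen)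
    rw [solutionLoop_nil, altLoop_nil]
  | succ m ih =>
    intro h s K cnt fa fb hlen hfa hfb hh hs hperm
    obtain ⟨fa, rfl⟩ : ∃ f, fa = f + 1 := ⟨fa - 1, by omega⟩
    obtain ⟨fb, rfl⟩ : ∃ f, fb = f + 1 := ⟨fb - 1, by omega⟩
    have hne : h ≠ [] := by
      intro h0; rw [h0] at hlen; simp at hlen
    obtain ⟨b, t, rfl⟩ : ∃ b t, s = b :: t := by
      rcases s with _ | ⟨b, t⟩
      · have := hperm.length_eq; rw [hlen] at this; simp at this
      · exact ⟨b, t, rfl⟩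
    obtain ⟨hh1, hp1, hm1⟩ := pyHeappop_spec h hne hh
    have hbt := List.pairwise_cons.mp hs
    -- the popped value equals the sorted head
    have hab : (pyHeappop h).1 = b := by
      have haS : (pyHeappop h).1 ∈ b :: t :=
        hperm.subset (hp1.subset List.mem_cons_self)
      rcases List.mem_cons.mp haS with h1 | h1
      · exact h1
      · exact le_antisymm (hm1 b (hperm.symm.subset List.mem_cons_self)) (hbt.1 _ h1)
    by_cases hK : (pyHeappop h).1 < K
    · have hbK : ¬ b ≥ K := by rw [← hab]; omega
      have hrl : (pyHeappop h).2.length = m := by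
        rw [pyHeappop_length h hne, hlen]
        omega
      have htl : t.length = m := by
        have := hperm.length_eq
        rw [hlen] at this
        simp at this
        omega
      by_cases hm0 : m = 0
      · obtain rfl : t = [] := List.length_eq_zero_iff.mp (by omega)
        rw [solutionLoop_neg1 fa h K cnt hne hK (by omega), altLoop_neg1 fb b K cnt hbK]
      · obtain ⟨c, t', rfl⟩ : ∃ c t', t = c :: t' := by
          rcases t with _ | ⟨c, t'⟩
          · simp at htl; omega
          · exact ⟨c, t', rfl⟩
        have hrne : (pyHeappop h).2 ≠ [] := by
          intro h0; rw [h0] at hrl; simp at hrl; omega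
        have hrt : (pyHeappop h).2.Perm (c :: t') := by
          have h2 : ((pyHeappop h).1 :: (pyHeappop h).2).Perm (b :: c :: t') :=
            hp1.trans hperm
          rw [hab] at h2
          exact h2.cons_inv
        obtain ⟨hh2, hp2, hm2⟩ := pyHeappop_spec (pyHeappop h).2 hrne hh1
        have hct := List.pairwise_cons.mp hbt.2
        have hbc : (pyHeappop (pyHeappop h).2).1 = c := by
          have haS : (pyHeappop (pyHeappop h).2).1 ∈ c :: t' :=
            hrt.subset (hp2.subset List.mem_cons_self)
          rcases List.mem_cons.mp haS with h1 | h1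
          · exact h1
          · exact le_antisymm (hm2 c (hrt.symm.subset List.mem_cons_self)) (hct.1 _ h1)
        have hrt' : (pyHeappop (pyHeappop h).2).2.Perm t' := by
          have h2 : ((pyHeappop (pyHeappop h).2).1 :: (pyHeappop (pyHeappop h).2).2).Perm
              (c :: t') := hp2.trans hrt
          rw [hbc] at h2
          exact h2.cons_inv
        obtain ⟨hh3, hp3⟩ := pyHeappush_spec (pyHeappop (pyHeappop h).2).2
          ((pyHeappop h).1 + (pyHeappop (pyHeappop h).2).1 * 2) hh2
        rw [solutionLoop_step fa h K cnt hne hK (by omega),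
          altLoop_step fb b c t' K cnt hbK]
        refine ih _ _ K (cnt + 1) fa fb ?_ (by omega) (by omega) hh3
          (insLoop_pairwise _ _ hct.2) ?_
        · rw [pyHeappush_length,
            pyHeappop_length (pyHeappop h).2 hrne, hrl]
          omega
        · refine hp3.trans ?_
          rw [hab, hbc]
          refine ((hrt'.cons _).trans ?_)
          have : b + c * 2 = b + 2 * c := by ring
          rw [this]
          exact (insLoop_perm (b + 2 * c) t').symm
    · rw [solutionLoop_ret fa h K cnt hne hK, altLoop_ret fb b t K cnt (by omega)]

-- ―――― the merge process: bPop facts ――――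

-- bPop takes the head of one of the two lists and leaves the other untouched
theorem bPop_cases (u w : List Int) (hne : u ≠ [] ∨ w ≠ []) :
    (∃ x u', u = x :: u' ∧ bPop u w = (x, u', w)) ∨
    (∃ m w', w = m :: w' ∧ bPop u w = (m, u, w')) := by
  match u, w with
  | x :: u', m :: w' =>
    simp only [bPop]
    split
    · exact Or.inl ⟨x, u', rfl, rfl⟩
    · exact Or.inr ⟨m, w', rfl, rfl⟩
  | x :: u', [] => exact Or.inl ⟨x, u', rfl, rfl⟩
  | [], m :: w' => exact Or.inr ⟨m, w', rfl, rfl⟩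
  | [], [] => rcases hne with h | h <;> cases h rfl

-- the mixtures component only loses elements from the front
theorem bPop_snd_suffix (u w : List Int) : (bPop u w).2.2 <:+ w := by
  match u, w with
  | x :: u', m :: w' =>
    simp only [bPop]
    split
    · exact List.suffix_refl _
    · exact List.suffix_cons _ _
  | x :: u', [] => exact List.suffix_refl _
  | [], m :: w' => exact List.suffix_cons _ _
  | [], [] => exact List.suffix_refl _

-- both output lists stay sorted
theorem bPop_pairwise (u w : List Int) (hu : u.Pairwise (· ≤ ·)) (hw : w.Pairwise (· ≤ ·)) :
    (bPop u w).2.1.Pairwise (· ≤ ·) ∧ (bPop u w).2.2.Pairwise (· ≤ ·) := by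
  match u, w with
  | x :: u', m :: w' =>
    simp only [bPop]
    split
    · exact ⟨hu.of_cons, hw⟩
    · exact ⟨hu, hw.of_cons⟩
  | x :: u', [] => exact ⟨hu.of_cons, List.Pairwise.nil⟩
  | [], m :: w' => exact ⟨List.Pairwise.nil, hw.of_cons⟩
  | [], [] => exact ⟨List.Pairwise.nil, List.Pairwise.nil⟩

-- on sorted lists whose union is the sorted pool a :: t, bPop returns a and a union ~ t
theorem bPop_min (a : Int) (t u w : List Int)
    (hs : (a :: t).Pairwise (· ≤ ·)) (hu : u.Pairwise (· ≤ ·)) (hw : w.Pairwise (· ≤ ·))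
    (hperm : (a :: t).Perm (u ++ w)) :
    (bPop u w).1 = a ∧ ((bPop u w).2.1 ++ (bPop u w).2.2).Perm t := by
  have hmem : a ∈ u ++ w := hperm.subset List.mem_cons_self
  have hne : u ≠ [] ∨ w ≠ [] := by
    rcases List.mem_append.mp hmem with h | h
    · exact Or.inl (List.ne_nil_of_mem h)
    · exact Or.inr (List.ne_nil_of_mem h)
  have hlow : ∀ y ∈ u ++ w, a ≤ y := by
    intro y hy
    rcases List.mem_cons.mp (hperm.symm.subset hy) with rfl | h
    · exact le_refl y
    · exact (List.pairwise_cons.mp hs).1 y h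
  rcases bPop_cases u w hne with ⟨x, u', rfl, heq⟩ | ⟨m, w', rfl, heq⟩
  · -- took the xs head: show x = a
    have hxa : x = a := by
      refine le_antisymm ?_ (hlow x (by simp))
      -- a ∈ (x :: u') ++ w; if a ∈ u then x ≤ a; if a ∈ w then front of w ≤ a... 
      rcases List.mem_append.mp hmem with h | h
      · rcases List.mem_cons.mp h with rfl | h
        · exact le_refl a
        · exact (List.pairwise_cons.mp hu).1 a h
      · -- a ∈ w; bPop took x, so w = [] ∨ x ≤ w.head ≤ a
        rcases w with _ | ⟨m, w'⟩
        · cases h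
        · have hma : m ≤ a := by
            rcases List.mem_cons.mp h with rfl | h2
            · exact le_refl a
            · exact (List.pairwise_cons.mp hw).1 a h2
          have hxm : x ≤ m := by
            -- from the equation: the branch taken was x ≤ m
            by_cases hx : x ≤ m
            · exact hx
            · exfalso
              simp only [bPop, if_neg hx] at heq
              have := congrArg (fun p => p.2.2) heq
              simp at this
          exact le_trans hxm hma
    subst hxa
    rw [heq]
    exact ⟨rfl, hperm.cons_inv.symm⟩
  · have hma : m = a := by
      refine le_antisymm ?_ (hlow m (by simp))
      rcases List.mem_append.mp hmem with h | h
      · -- a ∈ u; bPop took m, so u = [] ∨ m < u.head ≤ a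
        rcases u with _ | ⟨x, u'⟩
        · cases h
        · have hxa : x ≤ a := by
            rcases List.mem_cons.mp h with rfl | h2
            · exact le_refl a
            · exact (List.pairwise_cons.mp hu).1 a h2
          have hmx : m ≤ x := by
            by_cases hx : x ≤ m
            · exfalso
              simp only [bPop, if_pos hx] at heq
              have := congrArg (fun p => p.2.2) heq
              simp at this
            · omega
          exact le_trans hmx hxa
      · rcases List.mem_cons.mp h with rfl | h2
        · exact le_refl a
        · exact (List.pairwise_cons.mp hw).1 a h2
    subst hma
    rw [heq]
    have h2 : (u ++ m :: w').Perm (m :: (u ++ w')) := List.perm_middle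
    exact ⟨rfl, (hperm.trans h2).cons_inv.symm⟩

-- ―――― the merge invariant ――――

-- Either every queued mixture is at most (head + 2·second) of the pool — what the next
-- append needs — or the queue is a single element that is strictly below the pool's
-- second element and is therefore consumed before the next append.
def MInv (s ms : List Int) : Prop :=
  (∀ p q r, s = p :: q :: r → ∀ m ∈ ms, m ≤ p + 2 * q) ∨
  (∃ w, ms = [w] ∧ (∀ p r, s = p :: r → w ≤ p) ∧ (∀ p q r, s = p :: q :: r → w < q))

-- the freshly inserted mixture is at most (head + 2·second) of the new pool,
-- provided the old pool's third element (head of rest) is nonnegative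
theorem insLoop_head_bound (a b : Int) (rest : List Int)
    (hab : a ≤ b) (hbr : ∀ y ∈ rest, b ≤ y) (hhd : ∀ c r', rest = c :: r' → 0 ≤ c) :
    ∀ p q r, insLoop (a + 2 * b) rest = p :: q :: r → a + 2 * b ≤ p + 2 * q := by
  intro p q r heq
  match rest with
  | [] => simp [insLoop] at heq
  | c :: rest' =>
    have hc0 : 0 ≤ c := hhd c rest' rfl
    have hbc : b ≤ c := hbr c List.mem_cons_self
    rw [insLoop] at heq
    split at heq
    · rename_i hlt
      -- c < v : heq : c :: insLoop v rest' = p :: q :: r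
      obtain ⟨rfl, heq2⟩ : c = p ∧ insLoop (a + 2 * b) rest' = q :: r := by
        rw [List.cons_eq_cons] at heq; exact ⟨heq.1, heq.2⟩
      match rest' with
      | [] =>
        simp only [insLoop, List.cons_eq_cons] at heq2
        obtain ⟨rfl, -⟩ := heq2
        omega
      | d :: r'' =>
        have hbd : b ≤ d := hbr d (by simp)
        rw [insLoop] at heq2
        split at heq2
        · rw [List.cons_eq_cons] at heq2
          obtain ⟨rfl, -⟩ := heq2
          omega
        · rw [List.cons_eq_cons] at heq2
          obtain ⟨rfl, -⟩ := heq2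
          omega
    · -- v ≤ c : heq : v :: c :: rest' = p :: q :: r
      rename_i hnlt
      rw [List.cons_eq_cons, List.cons_eq_cons] at heq
      obtain ⟨h1, h2, -⟩ := heq
      omega

-- ―――― the reference-vs-merge bisimulation ――――

theorem merge_eq : ∀ (n : Nat) (s xs ms : List Int) (K cnt : Int) (fa fm : Nat),
    s.length = n → n ≤ fa → n ≤ fm →
    s.Pairwise (· ≤ ·) → xs.Pairwise (· ≤ ·) → ms.Pairwise (· ≤ ·) →
    s.Perm (xs ++ ms) → MInv s ms →
    altLoop fa s K cnt = mergeLoop fm xs ms K cnt := by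
  intro n
  induction n with
  | zero =>
    intro s xs ms K cnt fa fm hlen _ _ _ _ _ hperm _
    obtain rfl : s = [] := List.length_eq_zero_iff.mp hlen
    have h0 : xs.length + ms.length = 0 := by
      have := hperm.length_eq; simp at this; omega
    rw [altLoop_nil]
    cases fm
    · rfl
    · simp only [mergeLoop]
      rw [if_pos h0]
  | succ n ih =>
    intro s xs ms K cnt fa fm hlen hfa hfm hs hxs hms hperm hinv
    obtain ⟨fa, rfl⟩ : ∃ f, fa = f + 1 := ⟨fa - 1, by omega⟩
    obtain ⟨fm, rfl⟩ : ∃ f, fm = f + 1 := ⟨fm - 1, by omega⟩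
    obtain ⟨a, t, rfl⟩ : ∃ a t, s = a :: t := by
      rcases s with _ | ⟨a, t⟩
      · simp at hlen
      · exact ⟨a, t, rfl⟩
    obtain ⟨hP1, hPr⟩ := bPop_min a t xs ms hs hxs hms hperm
    have hlne : ¬ xs.length + ms.length = 0 := by
      have := hperm.length_eq
      simp only [List.length_cons, List.length_append] at this
      omega
    simp only [mergeLoop]
    rw [if_neg hlne, hP1]
    by_cases hK : a ≥ K
    · rw [if_pos hK, altLoop_ret _ _ _ _ _ hK]
    · rw [if_neg hK]
      have hP1s := (bPop_pairwise xs ms hxs hms).1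
      have hP2s := (bPop_pairwise xs ms hxs hms).2
      match t, fm, fa with
      | [], fm, fa =>
        -- pool exhausted after the first pop
        have h0 : (bPop xs ms).2.1.length + (bPop xs ms).2.2.length = 0 := by
          have := hPr.length_eq
          simp only [List.length_append, List.length_nil] at this
          omega
        rw [if_pos h0, altLoop_neg1 _ _ _ _ hK]
      | b :: rest, fm, fa =>
        have h0 : ¬ ((bPop xs ms).2.1.length + (bPop xs ms).2.2.length = 0) := by
          have := hPr.length_eq
          simp only [List.length_append, List.length_cons] at this
          omega
        rw [if_neg h0]
        obtain ⟨hQ1, hQr⟩ :=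
          bPop_min b rest (bPop xs ms).2.1 (bPop xs ms).2.2 hs.of_cons hP1s hP2s hPr.symm
        rw [hQ1, altLoop_step _ _ _ _ _ _ hK]
        -- names for the state after the two pops
        set xs2 := (bPop (bPop xs ms).2.1 (bPop xs ms).2.2).2.1 with hxs2
        set ms2 := (bPop (bPop xs ms).2.1 (bPop xs ms).2.2).2.2 with hms2
        have hxs2s := (bPop_pairwise (bPop xs ms).2.1 (bPop xs ms).2.2 hP1s hP2s).1
        have hms2s := (bPop_pairwise (bPop xs ms).2.1 (bPop xs ms).2.2 hP1s hP2s).2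
        -- ms2 is a suffix (hence subset) of ms
        have hsuf : ms2 <:+ ms :=
          (bPop_snd_suffix (bPop xs ms).2.1 (bPop xs ms).2.2).trans (bPop_snd_suffix xs ms)
        -- facts about the sorted pool
        have hab : a ≤ b := (List.pairwise_cons.mp hs).1 b List.mem_cons_self
        have hbr : ∀ y ∈ rest, b ≤ y := (List.pairwise_cons.mp hs.of_cons).1
        -- every surviving queued mixture is ≤ the new mixture a + 2*b
        have hAll : ∀ m ∈ ms2, m ≤ a + 2 * b := by
          rcases hinv with hD1 | ⟨w, hw, hw1, hw2⟩
          · intro m hm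
            exact hD1 a b rest rfl m (hsuf.subset hm)
          · -- singleton queue strictly below the pool's second element: it cannot survive
            intro m hm
            exfalso
            have hwa : w ≤ a := hw1 a (b :: rest) rfl
            have hwb : w < b := hw2 a b rest rfl
            subst hw
            -- m ∈ ms2 and ms2 <:+ [w] force ms2 = [w]: neither pop touched the queue
            have hms2e : ms2 = [w] := by
              rcases (List.suffix_cons_iff.mp hsuf) with h | h
              · exact h
              · simp at h
                rw [h] at hm
                cases hm
            rcases xs with _ | ⟨x, xs'⟩
            · -- first pop takes w, the second leaves the queue empty: ms2 = [] ≠ [w]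
              have h2 : ms2 = [] := by rw [hms2]; rfl
              rw [h2] at hms2e
              simp at hms2e
            · have hx_le : x ≤ w := by
                by_cases hx : x ≤ w
                · exact hx
                · exfalso
                  -- otherwise the first pop takes w and the queue stays empty
                  have h2 : ms2 = [] := by
                    rw [hms2]
                    simp only [bPop, if_neg hx]

                  rw [h2] at hms2e
                  simp at hms2e
              -- second pop: with the queue intact it takes some y ≤ w from xs', and y = b
              have hms2e' : (bPop (bPop (x :: xs') [w]).2.1
                  (bPop (x :: xs') [w]).2.2).2.2 = [w] := by
                rw [← hms2]; exact hms2e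
              simp only [bPop, if_pos hx_le] at hQ1 hms2e'
              rcases xs' with _ | ⟨y, ys⟩
              · simp at hms2e'
              · by_cases hy : y ≤ w
                · simp only [if_pos hy] at hQ1
                  omega
                · simp only [if_neg hy] at hms2e'
                  simp at hms2e'
          -- (end of hAll)
        -- new sorted pool and its properties
        have hslen : (insLoop (a + 2 * b) rest).length = n := by
          rw [insLoop_length]
          simp at hlen
          omega
        have hs'' : (insLoop (a + 2 * b) rest).Pairwise (· ≤ ·) :=
          insLoop_pairwise _ _ hs.of_cons.of_cons
        have hmsnew : (ms2 ++ [a + 2 * b]).Pairwise (· ≤ ·) := by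
          rw [List.pairwise_append]
          exact ⟨hms2s, List.pairwise_singleton _ _,
            fun m hm y hy => by rw [List.mem_singleton.mp hy]; exact hAll m hm⟩
        have hpermnew : (insLoop (a + 2 * b) rest).Perm (xs2 ++ (ms2 ++ [a + 2 * b])) := by
          refine (insLoop_perm _ _).trans ?_
          refine ((hQr.symm.cons (a + 2 * b))).trans ?_
          rw [← List.append_assoc]
          exact (List.perm_append_singleton _ _).symm
        -- the invariant for the new state
        have hinvnew : MInv (insLoop (a + 2 * b) rest) (ms2 ++ [a + 2 * b]) := by
          match rest with
          | [] =>
            -- new pool has a single element: the left disjunct is vacuous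
            left
            intro p q r heq
            simp [insLoop] at heq
          | c :: rest' =>
            have hbc : b ≤ c := hbr c List.mem_cons_self
            by_cases hc0 : 0 ≤ c
            · left
              intro p q r heq m hm
              have hv : a + 2 * b ≤ p + 2 * q :=
                insLoop_head_bound a b (c :: rest') hab hbr
                  (fun c' r' h => by rw [List.cons_eq_cons] at h; omega) p q r heq
              rcases List.mem_append.mp hm with h | h
              · exact le_trans (hAll m h) hv
              · rw [List.mem_singleton.mp h]; exact hv
            · -- third pool element negative: queue must be empty, new queue is a singleton
              have hms2nil : ms2 = [] := by
                rcases hms2x : ms2 with _ | ⟨m0, ms2'⟩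
                · rfl
                · exfalso
                  have hm0 : m0 ∈ ms2 := by rw [hms2x]; exact List.mem_cons_self
                  have hm0r : m0 ∈ c :: rest' := by
                    exact hQr.subset (List.mem_append.mpr (Or.inr hm0))
                  have hm0b : b ≤ m0 := hbr m0 hm0r
                  have hm0v : m0 ≤ a + 2 * b := hAll m0 hm0
                  -- b ≤ m0 ≤ a + 2b with a ≤ b gives 0 ≤ b ≤ c, contradiction
                  omega
              right
              have hvc : a + 2 * b < c := by omega
              have heq : insLoop (a + 2 * b) (c :: rest') =
                  (a + 2 * b) :: c :: rest' := by
                rw [insLoop, if_neg (by omega)]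
              refine ⟨a + 2 * b, by rw [hms2nil]; rfl, ?_, ?_⟩
              · intro p r h
                rw [heq, List.cons_eq_cons] at h
                omega
              · intro p q r h
                rw [heq, List.cons_eq_cons, List.cons_eq_cons] at h
                obtain ⟨h1, h2, -⟩ := h
                omega
        exact ih (insLoop (a + 2 * b) rest) xs2 (ms2 ++ [a + 2 * b]) K (cnt + 1) fa fm
          hslen (by omega) (by omega) hs'' hxs2s hmsnew hpermnew hinvnew

-- ===== VERDICT (by name: the statement is the Claim_ definition above) =====
theorem solution_spec : Claim_equal_solution := by
  intro SV K _hd _hp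
  unfold Spec_solution solution solution_alt
  obtain ⟨hh, hperm⟩ := pyHeapify_spec SV
  have hsortperm := (PySem.List.sorted_perm SV (fun x => x) false).symm
  have h1 : solutionLoop SV.length (pyHeapify SV) K 0 =
      altLoop SV.length (PySem.List.sorted SV (fun x => x) false) K 0 :=
    loops_eq (pyHeapify SV).length (pyHeapify SV) _ K 0 SV.length SV.length rfl
      (le_of_eq hperm.length_eq) (le_of_eq hperm.length_eq) hh
      (by simpa using PySem.List.sorted_pairwise SV (fun x => x))
      (hperm.trans hsortperm)
  rw [h1]
  exact merge_eq SV.length (PySem.List.sorted SV (fun x => x) false)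
    (PySem.List.sorted SV (fun x => x) false) [] K 0 SV.length SV.length
    hsortperm.symm.length_eq le_rfl le_rfl
    (by simpa using PySem.List.sorted_pairwise SV (fun x => x))
    (by simpa using PySem.List.sorted_pairwise SV (fun x => x))
    List.Pairwise.nil (by simp)
    (Or.inl (fun p q r _ m hm => by cases hm))
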